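-- pv_equiv track=rewrite | github.com/hrl13260130208/journal | journal/website/N-OMICS.py | split_author_sup
-- ===== SOURCE A (Python) =====
-- def split_author_sup(text,key_set,sup_list):
--     num=get_sup(text,key_set,0)
--     if num==0:
--         for key in key_set:
--             if key in text:
--                 raise ValueError("脚标位置有误或有未知的脚标！")
--         return text,sup_list
--     else:
--         sup_list.append(text[-num:])
--         if num==len(text):
--             return None,sup_list
--         else:
--             return split_author_sup(text[:-num],key_set,sup_list)
--
-- def get_sup(text,key_set,num):
--     new_num=num+1
--     if text[-new_num:] in key_set:
--         return get_sup(text,key_set,new_num)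
--     else:
--         return num
-- ===== SOURCE B (Python) =====
-- def split_author_sup(text, key_set, sup_list):
--     # Iterative re-implementation: explicit while-loop instead of the double
--     # recursion, membership via a set built once, index-based slicing.
--     keys = set(key_set)
--     while True:
--         n = len(text)
--         num = 0
--         while num < n and text[n - num - 1:] in keys:
--             num += 1
--         if num == 0:
--             for key in key_set:
--                 if key in text:
--                     raise ValueError("脚标位置有误或有未知的脚标！")
--             return text, sup_list
--         sup_list.append(text[n - num:])
--         if num == n:
--             return None, sup_list
--         text = text[:n - num]
-- ===== Notes on version B (the rewrite author's own statement) =====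
-- stated objective: alternative
-- what changed: Replaces the double recursion (outer tail recursion plus the recursive get_sup helper) by a single explicit while-loop with an inner counting loop, a membership set built once from key_set, and index-based slicing.
import Mathlib
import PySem

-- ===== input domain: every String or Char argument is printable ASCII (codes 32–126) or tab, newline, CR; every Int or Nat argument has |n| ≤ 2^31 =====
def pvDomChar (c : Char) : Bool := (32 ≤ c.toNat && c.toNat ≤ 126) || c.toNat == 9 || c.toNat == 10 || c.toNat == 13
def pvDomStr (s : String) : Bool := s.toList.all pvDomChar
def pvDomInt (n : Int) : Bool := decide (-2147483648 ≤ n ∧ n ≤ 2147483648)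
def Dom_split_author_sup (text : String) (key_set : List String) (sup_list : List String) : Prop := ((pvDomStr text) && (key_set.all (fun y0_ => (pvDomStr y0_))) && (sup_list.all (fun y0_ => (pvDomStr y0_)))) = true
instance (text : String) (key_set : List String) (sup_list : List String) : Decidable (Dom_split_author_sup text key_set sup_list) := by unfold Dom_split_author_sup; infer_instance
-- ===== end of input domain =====

-- ===== PORT A =====
-- B: explicit loop + membership set + index slicing instead of A's double recursion; A mutates
-- sup_list in place (append), so the equivalence proved here is about the returned pair.

-- get_sup(text, key_set, num): extend num while text[-(num+1):] is in key_set.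
-- Where Python would recurse forever (num+1 > len(text) with the whole text a key) the
-- port returns num; those inputs are excluded by Pre_ (A raises RecursionError there).
def pvGetSupA (t : List Char) (ks : List String) (num : Nat) : Nat :=
  let new_num := num + 1
  if new_num ≤ t.length ∧ String.ofList (PySem.List.slice t (some (-(new_num : Int)))) ∈ ks then
    pvGetSupA t ks new_num
  else
    num
termination_by t.length - num

-- bound cited by pvSplitA's decreasing_by
theorem pvGetSupA_bound (t : List Char) (ks : List String) :
    ∀ num : Nat, num ≤ t.length → pvGetSupA t ks num ≤ t.length := by
  intro num
  fun_induction pvGetSupA t ks num with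
  | case1 n nn hc ih => intro h; exact ih hc.1
  | case2 n nn hc => intro h; exact h

-- split_author_sup, recursive as in A.  In the num == 0 branch Python scans key_set and
-- raises ValueError when some key occurs in text (excluded by Pre_); otherwise that scan
-- is a no-op and it returns (text, sup_list).
def pvSplitA (t : List Char) (ks : List String) (sup : List String) :
    Option String × List String :=
  if pvGetSupA t ks 0 = 0 then
    (some (String.ofList t), sup)
  else
    if pvGetSupA t ks 0 = t.length then
      (none, sup ++ [String.ofList (PySem.List.slice t (some (-(pvGetSupA t ks 0 : Int))))])
    else
      pvSplitA (PySem.List.slice t none (some (-(pvGetSupA t ks 0 : Int)))) ks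
        (sup ++ [String.ofList (PySem.List.slice t (some (-(pvGetSupA t ks 0 : Int))))])
termination_by t.length
decreasing_by
  have hle : pvGetSupA t ks 0 ≤ t.length := pvGetSupA_bound t ks 0 (Nat.zero_le _)
  have h0 : pvGetSupA t ks 0 ≠ 0 := by assumption
  have h1 : pvGetSupA t ks 0 ≠ t.length := by assumption
  rw [PySem.List.slice_to_neg_natCast t (pvGetSupA t ks 0) (by omega)]
  simp only [List.length_take]
  omega

def split_author_sup (text : String) (key_set : List String) (sup_list : List String) : Option String × List String :=
  pvSplitA text.toList key_set sup_list

-- ===== PORT B =====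
-- inner while-loop of B:  while num < n and text[n - num - 1:] in keys: num += 1
def pvAltNum (t : List Char) (keys : PySem.Set String) (num : Nat) : Nat :=
  if num < t.length ∧ String.ofList (t.drop (t.length - num - 1)) ∈ keys then
    pvAltNum t keys (num + 1)
  else
    num
termination_by t.length - num

-- bound cited by pvAltLoop's decreasing_by
theorem pvAltNum_bound (t : List Char) (keys : PySem.Set String) :
    ∀ num : Nat, num ≤ t.length → pvAltNum t keys num ≤ t.length := by
  intro num
  fun_induction pvAltNum t keys num with
  | case1 n hc ih => exact fun h => ih hc.1
  | case2 n hc => exact fun h => h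

-- outer `while True` loop of B (one call = one iteration; `text = text[:n - num]` followed
-- by the next iteration becomes the tail call).  The ValueError branch (num == 0 and some
-- key occurs in text) is excluded by Pre_; there the scan is a no-op and B returns
-- (text, sup_list).
def pvAltLoop (t : List Char) (keys : PySem.Set String) (sup : List String) :
    Option String × List String :=
  let n := t.length
  let num := pvAltNum t keys 0
  if num = 0 then
    (some (String.ofList t), sup)
  else
    let sup2 := sup ++ [String.ofList (t.drop (n - num))]
    if num = n then
      (none, sup2)
    else
      pvAltLoop (t.take (n - num)) keys sup2
termination_by t.length
decreasing_by
  have hle : pvAltNum t keys 0 ≤ t.length := pvAltNum_bound t keys 0 (Nat.zero_le _)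
  have h0 : pvAltNum t keys 0 ≠ 0 := by assumption
  simp only [List.length_take]
  omega

def split_author_sup_alt (text : String) (key_set : List String) (sup_list : List String) : Option String × List String :=
  pvAltLoop text.toList (PySem.Set.ofList key_set) sup_list

-- ===== PRECONDITION & SPEC =====
-- pvSupLen t ks: the count stripped in one round — the largest k such that every suffix of t
-- of length 1..k is a key (first j in [0, len) whose suffix of length j+1 is not a key; len
-- if every suffix is a key).
def pvSupLen (t : List Char) (ks : List String) : Nat :=
  match (List.range t.length).find?
      (fun j => !(decide (String.ofList (t.drop (t.length - j - 1)) ∈ ks))) with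
  | some j => j
  | none => t.length

-- pvSafeAux: A returns normally iff no round consumes the whole residual (there A's get_sup
-- recurses forever: RecursionError) and the final residual contains no key as a substring
-- (there A raises ValueError).  The raise condition is inherently about the residuals of
-- the stripping process, so it is stated by recursion on the text; the Nat argument is a
-- bound on the residual length (each round removes k ≥ 1 characters, so text.length bounds
-- the rounds) that makes the recursion structural, hence kernel-decidable.
def pvSafeAux (ks : List String) : Nat → List Char → Bool
  | bound, t =>
    let k := pvSupLen t ks
    if k = 0 then
      ks.all (fun key => !(decide (key.toList <:+: t)))
    else if k = t.length then
      false
    else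
      match bound with
      | 0 => false  -- unreachable: 1 ≤ k < t.length ≤ bound, so the residual is shorter than bound
      | bound + 1 => pvSafeAux ks bound (t.take (t.length - k))

-- Pre_ excludes exactly the inputs on which the Python A raises: ValueError when, after
-- stripping, some key still occurs in the remaining text, and RecursionError when every
-- suffix of some residual is a key (get_sup never returns).
def Pre_split_author_sup (text : String) (key_set : List String) (sup_list : List String) : Prop :=
  pvSafeAux key_set text.toList.length text.toList = true
instance (text : String) (key_set : List String) (sup_list : List String) : Decidable (Pre_split_author_sup text key_set sup_list) := by unfold Pre_split_author_sup; infer_instance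

def pvWitness_split_author_sup : String × List String × List String :=
  ("Smith12", ["1", "2", "12"], ["0"])

def Spec_split_author_sup (text : String) (key_set : List String) (sup_list : List String) (out : Option String × List String) : Prop := out = split_author_sup_alt text key_set sup_list
instance (text : String) (key_set : List String) (sup_list : List String) (out : Option String × List String) : Decidable (Spec_split_author_sup text key_set sup_list out) := by unfold Spec_split_author_sup; infer_instance

-- ===== CLAIM (what is proved, stated in full; the proofs are below) =====
def Claim_equal_split_author_sup : Prop := ∀ (text : String) (key_set : List String) (sup_list : List String), Dom_split_author_sup text key_set sup_list → Pre_split_author_sup text key_set sup_list → Spec_split_author_sup text key_set sup_list (split_author_sup text key_set sup_list)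

-- ===== LEMMAS AND PROOFS =====
-- The two inner loops agree: B's bounded counting loop computes A's get_sup.
theorem pvAltNum_eq_pvGetSupA (t : List Char) (ks : List String) :
    ∀ num : Nat, pvAltNum t (PySem.Set.ofList ks) num = pvGetSupA t ks num := by
  intro num
  fun_induction pvGetSupA t ks num with
  | case1 n nn hc ih =>
      rw [pvAltNum, if_pos, ih]
      refine ⟨by omega, ?_⟩
      have h2 := hc.2
      rw [PySem.List.slice_from_neg_natCast t nn (by omega)] at h2
      simpa [PySem.Set.mem_ofList, Nat.sub_sub] using h2
  | case2 n nn hc =>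
      rw [pvAltNum, if_neg]
      intro hB
      exact hc ⟨by omega, by
        rw [PySem.List.slice_from_neg_natCast t nn (by omega)]
        simpa [PySem.Set.mem_ofList, Nat.sub_sub] using hB.2⟩

-- The outer loop of B computes A's recursion.

theorem pvAltLoop_eq_pvSplitA (t : List Char) (ks : List String) (sup : List String) :
    pvAltLoop t (PySem.Set.ofList ks) sup = pvSplitA t ks sup := by
  fun_induction pvSplitA t ks sup with
  | case1 t sup h0 =>
      rw [pvAltLoop]
      simp [pvAltNum_eq_pvGetSupA, h0]
  | case2 t sup h0 h1 =>
      rw [pvAltLoop]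
      have hne : t ≠ [] := by intro h; subst h; exact h0 (by simpa using h1)
      rw [PySem.List.slice_from_neg_natCast t (pvGetSupA t ks 0) (by omega)]
      simp [pvAltNum_eq_pvGetSupA, h1, hne]
  | case3 t sup h0 h1 ih =>
      rw [pvAltLoop]
      rw [PySem.List.slice_from_neg_natCast t (pvGetSupA t ks 0) (by omega),
        PySem.List.slice_to_neg_natCast t (pvGetSupA t ks 0) (by omega)] at ih
      rw [PySem.List.slice_from_neg_natCast t (pvGetSupA t ks 0) (by omega),
        PySem.List.slice_to_neg_natCast t (pvGetSupA t ks 0) (by omega)]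
      simp [pvAltNum_eq_pvGetSupA, h0, h1, ih]

-- ===== VERDICT (by name: the statement is the Claim_ definition above) =====
theorem split_author_sup_spec : Claim_equal_split_author_sup := by
  intro text key_set sup_list _dom _pre
  unfold Spec_split_author_sup split_author_sup split_author_sup_alt
  exact (pvAltLoop_eq_pvSplitA text.toList key_set sup_list).symm
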